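-- pv_equiv track=rewrite | github.com/besthong/Algo | 코딜리티 - StrSymmetryPoint.py | solution
-- ===== SOURCE A (Python) =====
-- def solution(S):
--     n = len(S)
--     if n == 0:
--         return -1
--     if n == 1:
--         return 0
--     if len(S)%2==0:
--         return -1
--     left=0
--     right=n-1
--
--     while left<right:
--         if S[left]!=S[right]:
--             return -1
--         left+=1
--         right-=1
--     return left
-- ===== SOURCE B (Python) =====
-- def solution(S):
--     n = len(S)
--     if n == 0:
--         return -1
--     if n % 2 == 0:
--         return -1
--     return n // 2 if S == S[::-1] else -1
-- ===== Notes on version B (the rewrite author's own statement) =====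
-- stated objective: simpler
-- what changed: Replaces the stateful two-pointer scan with a single reverse-and-compare palindrome test returning n//2 on success; the separate n==1 guard disappears.
import Mathlib
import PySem

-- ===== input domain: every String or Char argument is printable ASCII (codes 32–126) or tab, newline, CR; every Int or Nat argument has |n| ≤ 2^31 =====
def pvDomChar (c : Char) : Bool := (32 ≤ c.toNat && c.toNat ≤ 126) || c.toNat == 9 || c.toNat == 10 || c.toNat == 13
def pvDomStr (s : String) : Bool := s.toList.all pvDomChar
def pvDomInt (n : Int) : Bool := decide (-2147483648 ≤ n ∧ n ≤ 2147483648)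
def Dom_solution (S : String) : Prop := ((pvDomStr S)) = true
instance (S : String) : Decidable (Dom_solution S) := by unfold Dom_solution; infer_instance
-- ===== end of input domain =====

-- B replaces A's two-pointer scan with a single reverse-and-compare palindrome test (objective: simpler).


-- ===== PORT A =====
-- the while loop: left/right two-pointer scan
def solutionLoop (cs : List Char) (left right : Int) : Int :=
  if left < right then
    if PySem.List.pyGet? cs left ≠ PySem.List.pyGet? cs right then -1
    else solutionLoop cs (left + 1) (right - 1)
  else left
termination_by (right - left).toNat
decreasing_by omega

def solution (S : String) : Int :=
  let cs := S.toList
  let n : Int := cs.length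
  if n = 0 then -1
  else if n = 1 then 0
  else if PySem.Int.mod n 2 = 0 then -1
  else solutionLoop cs 0 (n - 1)

-- ===== PORT B =====
def solution_alt (S : String) : Int :=
  let cs := S.toList
  let n : Int := cs.length
  if n = 0 then -1
  else if PySem.Int.mod n 2 = 0 then -1
  else if cs.reverse = cs then PySem.Int.floordiv n 2 else -1

-- ===== PRECONDITION & SPEC =====
def Spec_solution (S : String) (out : Int) : Prop := out = solution_alt S
instance (S : String) (out : Int) : Decidable (Spec_solution S out) := by unfold Spec_solution; infer_instance

-- ===== CLAIM (what is proved, stated in full; the proofs are below) =====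
def Claim_equal_solution : Prop := ∀ (S : String), Dom_solution S → Spec_solution S (solution S)

-- ===== LEMMAS AND PROOFS =====

-- characterisation of A's loop on symmetric indices l, n-1-l
theorem solutionLoop_eq (cs : List Char) (l : Nat) (h2 : 2 * l ≤ cs.length) :
    solutionLoop cs (l : Int) ((cs.length : Int) - 1 - l) =
      (if ∀ i < cs.length, l ≤ i → 2 * i + 1 < cs.length →
          cs[i]? = cs[cs.length - 1 - i]? then ((cs.length / 2 : Nat) : Int) else -1) := by
  set n := cs.length with hn
  by_cases hlt : (l : Int) < (n : Int) - 1 - l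
  · -- loop body runs: l < n - 1 - l, i.e. 2l + 2 ≤ n
    have hstep : 2 * l + 2 ≤ n := by omega
    rw [solutionLoop]
    have hl' : PySem.List.pyGet? cs (l : Int) = cs[l]? := by
      simpa using PySem.List.pyGet?_natCast cs l
    have hcast : ((n : Int) - 1 - l) = ((n - 1 - l : Nat) : Int) := by omega
    have hr' : PySem.List.pyGet? cs ((n : Int) - 1 - l) = cs[n - 1 - l]? := by
      rw [hcast]; simpa using PySem.List.pyGet?_natCast cs (n - 1 - l)
    rw [if_pos hlt, hl', hr']
    by_cases heq : cs[l]? = cs[n - 1 - l]?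
    · rw [if_neg (by simpa using heq)]
      have hrec : ((n : Int) - 1 - l) - 1 = (n : Int) - 1 - (l + 1 : Nat) := by push_cast; ring
      have hcastl : ((l : Int) + 1) = ((l + 1 : Nat) : Int) := by push_cast; ring
      rw [hcastl, hrec, solutionLoop_eq cs (l + 1) (by omega)]
      congr 1
      · -- the two bounded-∀ conditions are equivalent given cs[l]? = cs[n-1-l]?
        simp only [eq_iff_iff]
        constructor
        · intro h i hi hli hhalf
          rcases Nat.lt_or_ge l i with h' | h'
          · exact h i hi (by omega) hhalf
          · have : i = l := by omega
            subst this; exact heq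
        · intro h i hi hli hhalf
          exact h i hi (by omega) hhalf
    · rw [if_pos (by simpa using heq)]
      rw [if_neg]
      intro hall
      exact heq (hall l (by omega) (le_refl l) (by omega))
  · -- loop exits immediately: returns l, and the condition is vacuous
    rw [solutionLoop, if_neg hlt]
    rw [if_pos]
    · omega
    · intro i hi hli hhalf
      omega
termination_by cs.length - 2 * l
decreasing_by omega

-- palindromicity: reverse = self ↔ the half-range pairwise condition A checks
theorem reverse_eq_iff_half (cs : List Char) :
    (cs.reverse = cs) ↔
      (∀ i < cs.length, 0 ≤ i → 2 * i + 1 < cs.length →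
        cs[i]? = cs[cs.length - 1 - i]?) := by
  set n := cs.length with hn
  constructor
  · intro h i hi _ _
    have := congrArg (fun t => t[i]?) h
    simp only at this
    rw [List.getElem?_reverse hi] at this
    exact this.symm
  · intro h
    apply List.ext_getElem?
    intro i
    rcases Nat.lt_or_ge i n with hi | hi
    · rw [List.getElem?_reverse hi]
      by_cases hhalf : 2 * i + 1 < n
      · exact (h i hi (Nat.zero_le i) hhalf).symm
      · rcases Nat.lt_or_ge (2 * i + 1) (2 * n) with hcase | hcase
        · by_cases hmid : 2 * i + 1 = n
          · have : n - 1 - i = i := by omega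
            rw [this]
          · have hj : n - 1 - i < n := by omega
            have hjh : 2 * (n - 1 - i) + 1 < n := by omega
            have := h (n - 1 - i) hj (Nat.zero_le _) hjh
            have hji : n - 1 - (n - 1 - i) = i := by omega
            rw [hji] at this
            exact this
        · omega
    · have h1 : cs[i]? = none := by
        rw [List.getElem?_eq_none_iff]; omega
      have h2 : cs.reverse[i]? = none := by
        rw [List.getElem?_eq_none_iff]; simpa using hi
      rw [h1, h2]

-- ===== VERDICT (by name: the statement is the Claim_ definition above) =====
theorem solution_spec : Claim_equal_solution := by
  intro S _
  unfold Spec_solution solution solution_alt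
  set cs := S.toList with hcs
  by_cases h0 : ((cs.length : Int)) = 0
  · have hnil : cs = [] := by
      have : cs.length = 0 := by exact_mod_cast h0
      exact List.length_eq_zero_iff.mp this
    simp [hnil]
  · rw [if_neg h0, if_neg h0]
    by_cases h1 : ((cs.length : Int)) = 1
    · -- length 1: A returns 0; B: singleton is a palindrome, 1 // 2 = 0
      have hn1 : cs.length = 1 := by exact_mod_cast h1
      obtain ⟨c, hc⟩ := List.length_eq_one_iff.mp hn1
      rw [if_pos h1]
      simp [hc, PySem.Int.mod, PySem.Int.floordiv]
    · rw [if_neg h1]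
      by_cases hev : PySem.Int.mod ((cs.length : Int)) 2 = 0
      · rw [if_pos hev, if_pos hev]
      · rw [if_neg hev, if_neg hev]
        have hL := solutionLoop_eq cs 0 (by omega)
        simp only [Nat.cast_zero, sub_zero] at hL
        have hdiv : PySem.Int.floordiv ((cs.length : Int)) 2 = ((cs.length / 2 : Nat) : Int) := by
          exact_mod_cast PySem.Int.floordiv_natCast cs.length 2
        rw [hL, hdiv]
        exact if_congr (reverse_eq_iff_half cs).symm rfl rfl
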